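-- pv_equiv track=rewrite | github.com/wzsccy/GVPO | ML_EECBS/focalsearch_single_agent_planner.py | generate_motions_recursive
-- ===== SOURCE A (Python) =====
-- def generate_motions_recursive(num_agents,cur_agent, agent_motions = []):
--     directions = [(-1,1),(1, 0),(-1,-1),(0, -1),(1,1),(0, -1),(1,-1),(-1, 0), (0, 0)]  #下 右 上 左 等 左上 左下 右上 右下
--     if cur_agent == num_agents:
--         return [agent_motions]
--     joint_state_motions = []
--     for direction in directions:
--         next_agent_motions = generate_motions_recursive(num_agents, cur_agent + 1, agent_motions + [direction])
--         joint_state_motions.extend(next_agent_motions)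
--
--     return joint_state_motions
-- ===== SOURCE B (Python) =====
-- def generate_motions_recursive(num_agents, cur_agent, agent_motions = []):
--     directions = [(-1,1),(1, 0),(-1,-1),(0, -1),(1,1),(0, -1),(1,-1),(-1, 0), (0, 0)]
--     result = [list(agent_motions)]
--     for _ in range(num_agents - cur_agent):
--         result = [prefix + [d] for prefix in result for d in directions]
--     return result
-- ===== Notes on version B (the rewrite author's own statement) =====
-- stated objective: simpler
-- what changed: Replaces the recursive depth-first expansion with an iterative Cartesian-product loop that widens a list of prefixes num_agents - cur_agent times.
import Mathlib
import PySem

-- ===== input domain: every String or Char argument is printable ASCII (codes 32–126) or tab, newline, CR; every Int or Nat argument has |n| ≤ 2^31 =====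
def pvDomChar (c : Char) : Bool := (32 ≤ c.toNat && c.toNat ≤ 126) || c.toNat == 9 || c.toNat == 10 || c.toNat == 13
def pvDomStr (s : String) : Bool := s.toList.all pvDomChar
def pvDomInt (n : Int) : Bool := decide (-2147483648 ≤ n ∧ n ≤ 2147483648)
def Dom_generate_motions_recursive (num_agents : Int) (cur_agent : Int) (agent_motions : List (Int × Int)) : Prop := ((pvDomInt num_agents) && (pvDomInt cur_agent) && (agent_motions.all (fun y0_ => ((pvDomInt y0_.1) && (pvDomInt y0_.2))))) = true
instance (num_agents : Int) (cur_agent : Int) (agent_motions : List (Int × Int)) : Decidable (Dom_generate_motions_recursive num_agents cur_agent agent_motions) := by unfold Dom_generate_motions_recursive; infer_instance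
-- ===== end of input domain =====

-- ===== PORT A =====
-- B re-implements A's recursive joint-motion enumeration as an iterative Cartesian-product loop
-- (simpler decomposition, same cost); equivalence is claimed under Pre_ (cur_agent <= num_agents),
-- since A recurses forever (RecursionError) when cur_agent > num_agents.
def pvDirectionsA : List (Int × Int) :=
  [(-1,1),(1, 0),(-1,-1),(0, -1),(1,1),(0, -1),(1,-1),(-1, 0), (0, 0)]

-- A's recursion, with fuel = num_agents - cur_agent: under Pre_ the Python test
-- 'cur_agent == num_agents' holds exactly when the fuel reaches 0, and each recursive
-- call (cur_agent + 1) drops the fuel by one; the loop body is A's extend loop.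
def pvGenA : Nat → List (Int × Int) → List (List (Int × Int))
  | 0, agent_motions => [agent_motions]
  | n + 1, agent_motions =>
      pvDirectionsA.foldl
        (fun joint_state_motions direction =>
          joint_state_motions ++ pvGenA n (agent_motions ++ [direction])) []

def generate_motions_recursive (num_agents : Int) (cur_agent : Int) (agent_motions : List (Int × Int)) : List (List (Int × Int)) :=
  pvGenA (num_agents - cur_agent).toNat agent_motions

-- ===== PORT B =====
def pvDirectionsB : List (Int × Int) :=
  [(-1,1),(1, 0),(-1,-1),(0, -1),(1,1),(0, -1),(1,-1),(-1, 0), (0, 0)]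

def generate_motions_recursive_alt (num_agents : Int) (cur_agent : Int) (agent_motions : List (Int × Int)) : List (List (Int × Int)) :=
  (List.range (num_agents - cur_agent).toNat).foldl
    (fun result _ =>
      result.flatMap (fun pref => pvDirectionsB.map (fun d => pref ++ [d])))
    [agent_motions]

-- ===== PRECONDITION & SPEC =====
-- Pre_ excludes cur_agent > num_agents, where the Python A recurses without bound and raises RecursionError.
def Pre_generate_motions_recursive (num_agents : Int) (cur_agent : Int) (agent_motions : List (Int × Int)) : Prop :=
  cur_agent ≤ num_agents
instance (num_agents : Int) (cur_agent : Int) (agent_motions : List (Int × Int)) : Decidable (Pre_generate_motions_recursive num_agents cur_agent agent_motions) := by unfold Pre_generate_motions_recursive; infer_instance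
def pvWitness_generate_motions_recursive : Int × Int × (List (Int × Int)) := (2, 0, [])

def Spec_generate_motions_recursive (num_agents : Int) (cur_agent : Int) (agent_motions : List (Int × Int)) (out : List (List (Int × Int))) : Prop := out = generate_motions_recursive_alt num_agents cur_agent agent_motions
instance (num_agents : Int) (cur_agent : Int) (agent_motions : List (Int × Int)) (out : List (List (Int × Int))) : Decidable (Spec_generate_motions_recursive num_agents cur_agent agent_motions out) := by unfold Spec_generate_motions_recursive; infer_instance

-- ===== CLAIM (what is proved, stated in full; the proofs are below) =====
def Claim_equal_generate_motions_recursive : Prop := ∀ (num_agents : Int) (cur_agent : Int) (agent_motions : List (Int × Int)), Dom_generate_motions_recursive num_agents cur_agent agent_motions → Pre_generate_motions_recursive num_agents cur_agent agent_motions → Spec_generate_motions_recursive num_agents cur_agent agent_motions (generate_motions_recursive num_agents cur_agent agent_motions)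

-- ===== LEMMAS AND PROOFS =====

-- one expansion step of B's loop
def pvStep (L : List (List (Int × Int))) : List (List (Int × Int)) :=
  L.flatMap (fun pref => pvDirectionsB.map (fun d => pref ++ [d]))

theorem pvGenA_succ (n : Nat) (acc : List (Int × Int)) :
    pvGenA (n + 1) acc = pvDirectionsA.flatMap (fun d => pvGenA n (acc ++ [d])) := by
  simp [pvGenA, List.flatMap]

-- expanding at the root equals expanding at the leaves
theorem pvGenA_succ_step (n : Nat) (acc : List (Int × Int)) :
    pvGenA (n + 1) acc = pvStep (pvGenA n acc) := by
  induction n generalizing acc with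
  | zero =>
      rw [pvGenA_succ]
      simp [pvGenA, pvStep, List.flatMap, pvDirectionsA, pvDirectionsB]
  | succ n ih =>
      rw [pvGenA_succ, pvGenA_succ n acc]
      unfold pvStep
      simp only [pvStep] at ih ⊢
      rw [List.flatMap_assoc]
      exact List.flatMap_congr (fun d _ => ih (acc ++ [d]))

theorem pvFoldl_range_succ (n : Nat) (L : List (List (Int × Int))) :
    (List.range (n + 1)).foldl (fun result _ => pvStep result) L
      = pvStep ((List.range n).foldl (fun result _ => pvStep result) L) := by
  rw [List.range_succ, List.foldl_append]
  rfl

theorem pvIter_eq_genA (n : Nat) (acc : List (Int × Int)) :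
    (List.range n).foldl (fun result _ => pvStep result) [acc] = pvGenA n acc := by
  induction n with
  | zero => rfl
  | succ n ih => rw [pvFoldl_range_succ, ih, pvGenA_succ_step]

-- ===== VERDICT (by name: the statement is the Claim_ definition above) =====
theorem generate_motions_recursive_spec : Claim_equal_generate_motions_recursive := by
  intro num_agents cur_agent agent_motions _ _
  unfold Spec_generate_motions_recursive generate_motions_recursive generate_motions_recursive_alt
  exact (pvIter_eq_genA _ _).symm
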